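-- pv_equiv track=rewrite | github.com/thinktwice13/algos | codility/py/4-frog_river_one.py | fn
-- ===== SOURCE A (Python) =====
-- def fn(max_pos, leaves):
--     steps = {}
--
--     for sec, leaf in enumerate(leaves):
--         # Skip if already recorded or unnecessary fpr our target
--         if leaf in steps or leaf > max_pos or leaf <= 0:
--             continue
--         # Record leaf
--         steps[leaf] = True
--         # Impossible for all necessary leaves to have fallen
--         if sec < max_pos-1:
--             continue
--         # Return when fallen leaves match the target position
--         if len(steps) == max_pos:
--             return sec
--
--     return -1
-- ===== SOURCE B (Python) =====
-- def fn(max_pos, leaves):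
--     # Different traversal: iterate over the required positions 1..max_pos and
--     # look up each one's first-appearance second with list.index; the answer is
--     # the max of those seconds, or -1 as soon as some position never appears.
--     ans = -1
--     for p in range(1, max_pos + 1):
--         try:
--             idx = leaves.index(p)
--         except ValueError:
--             return -1
--         ans = max(ans, idx)
--     return ans
-- ===== Notes on version B (the rewrite author's own statement) =====
-- stated objective: alternative
-- what changed: B traverses the required positions 1..max_pos instead of the leaves: it looks up each position's first-appearance second with list.index and takes the max of those seconds, returning -1 as soon as a position is missing; A's seen-set scan with running count and early return disappears.
import Mathlib
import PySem

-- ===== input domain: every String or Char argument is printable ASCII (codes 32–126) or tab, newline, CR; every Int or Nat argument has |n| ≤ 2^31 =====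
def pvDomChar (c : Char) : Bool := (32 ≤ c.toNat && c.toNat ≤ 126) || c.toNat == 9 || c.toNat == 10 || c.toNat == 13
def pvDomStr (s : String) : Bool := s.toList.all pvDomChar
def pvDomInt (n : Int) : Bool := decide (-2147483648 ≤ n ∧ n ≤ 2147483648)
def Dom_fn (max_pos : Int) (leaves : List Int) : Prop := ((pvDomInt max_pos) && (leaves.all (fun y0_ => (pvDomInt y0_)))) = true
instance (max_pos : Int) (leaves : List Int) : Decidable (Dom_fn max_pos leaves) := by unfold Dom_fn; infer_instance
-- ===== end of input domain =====

-- B traverses the REQUIRED POSITIONS 1..max_pos (not the leaves): it looks up each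
-- position's first-appearance second with list.index and takes the max, returning -1
-- as soon as a position is missing; A's seen-set scan over the leaves disappears.

-- ===== PORT A =====
def fnGo (max_pos : Int) : List (Int × Int) → PySem.Dict Int Bool → Int
  | [], _ => -1
  | (sec, leaf) :: rest, steps =>
    if steps.contains leaf ∨ leaf > max_pos ∨ leaf ≤ 0 then fnGo max_pos rest steps
    else
      let steps' := steps.insert leaf true
      if sec < max_pos - 1 then fnGo max_pos rest steps'
      else if (steps'.size : Int) = max_pos then sec
      else fnGo max_pos rest steps'

def fn (max_pos : Int) (leaves : List Int) : Int :=
  fnGo max_pos (PySem.List.enumerate leaves) PySem.Dict.empty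

-- ===== PORT B =====
-- the for-loop over range(1, max_pos+1) with an early `return -1` on ValueError
def bGo (max_pos : Int) (leaves : List Int) (p : Int) (ans : Int) : Int :=
  if _h : p ≤ max_pos then
    match PySem.List.index? leaves p with
    | none => -1
    | some idx => bGo max_pos leaves (p + 1) (max ans (idx : Int))
  else ans
termination_by (max_pos + 1 - p).toNat
decreasing_by omega

def fn_alt (max_pos : Int) (leaves : List Int) : Int :=
  bGo max_pos leaves 1 (-1)

-- ===== PRECONDITION & SPEC =====
def Spec_fn (max_pos : Int) (leaves : List Int) (out : Int) : Prop := out = fn_alt max_pos leaves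
instance (max_pos : Int) (leaves : List Int) (out : Int) : Decidable (Spec_fn max_pos leaves out) := by unfold Spec_fn; infer_instance

-- ===== CLAIM (what is proved, stated in full; the proofs are below) =====
def Claim_equal_fn : Prop := ∀ (max_pos : Int) (leaves : List Int), Dom_fn max_pos leaves → Spec_fn max_pos leaves (fn max_pos leaves)

-- ===== LEMMAS AND PROOFS =====

-- Proof-only intermediate form: the first-occurrence dict (position -> earliest second).
def bLoop (max_pos : Int) (ps : List (Int × Int)) (first : PySem.Dict Int Int) : PySem.Dict Int Int :=
  ps.foldl (fun d p => if 0 < p.2 ∧ p.2 ≤ max_pos ∧ d.contains p.2 = false then d.insert p.2 p.1 else d) first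

def bFin (max_pos : Int) (first : PySem.Dict Int Int) : Int :=
  if 0 < max_pos ∧ (first.size : Int) = max_pos then
    match PySem.List.max? first.values (fun v => v) with
    | some m => m
    | none => -1
  else -1

-- first-appearance second of position q, as an Int (proof-only)
def gIdx (leaves : List Int) (q : Int) : Int := ((PySem.List.index? leaves q).getD 0 : Int)

-- A strictly increasing list of nonneg ints all ≤ s has length ≤ s + 1.
lemma len_le_of_sorted_bounded (l : List Int) (s : Int) (hs0 : 0 ≤ s)
    (hp : l.Pairwise (· < ·)) (h0 : ∀ v ∈ l, 0 ≤ v) (hsv : ∀ v ∈ l, v ≤ s) :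
    (l.length : Int) ≤ s + 1 := by
  have hnd : l.Nodup := hp.nodup
  have hsub : l.toFinset ⊆ Finset.Icc 0 s := by
    intro x hx; rw [List.mem_toFinset] at hx
    exact Finset.mem_Icc.mpr ⟨h0 x hx, hsv x hx⟩
  have hcard := Finset.card_le_card hsub
  rw [List.toFinset_card_of_nodup hnd, Int.card_Icc] at hcard
  omega

-- A nodup list of keys in (0, m] has length ≤ m.
lemma len_le_of_range (l : List Int) (m : Int) (hm : 0 ≤ m) (hnd : l.Nodup)
    (hr : ∀ k ∈ l, 0 < k ∧ k ≤ m) : (l.length : Int) ≤ m := by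
  have hsub : l.toFinset ⊆ Finset.Icc 1 m := by
    intro x hx; rw [List.mem_toFinset] at hx
    exact Finset.mem_Icc.mpr ⟨(hr x hx).1, (hr x hx).2⟩
  have hcard := Finset.card_le_card hsub
  rw [List.toFinset_card_of_nodup hnd, Int.card_Icc] at hcard
  omega

-- Pigeonhole: m distinct keys in (0, m] cover every position of (0, m].
lemma mem_of_full (l : List Int) (m : Int) (hnd : l.Nodup)
    (hr : ∀ k ∈ l, 0 < k ∧ k ≤ m) (hlen : (l.length : Int) = m)
    (x : Int) (hx0 : 0 < x) (hxm : x ≤ m) : x ∈ l := by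
  have hsub : l.toFinset ⊆ Finset.Icc 1 m := by
    intro y hy; rw [List.mem_toFinset] at hy
    exact Finset.mem_Icc.mpr ⟨(hr y hy).1, (hr y hy).2⟩
  have hcard : (Finset.Icc (1:Int) m).card ≤ l.toFinset.card := by
    rw [List.toFinset_card_of_nodup hnd, Int.card_Icc]; omega
  have heq := Finset.eq_of_subset_of_card_le hsub hcard
  have hx : x ∈ l.toFinset := heq ▸ Finset.mem_Icc.mpr ⟨hx0, hxm⟩
  rwa [List.mem_toFinset] at hx

-- max? of a list whose last element strictly dominates the rest.
lemma max?_append_last (vs : List Int) (s : Int) (h : ∀ v ∈ vs, v < s) :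
    PySem.List.max? (vs ++ [s]) (fun v => v) = some s := by
  obtain ⟨m, hm⟩ : ∃ m, PySem.List.max? (vs ++ [s]) (fun v => v) = some m := by
    cases hmx : PySem.List.max? (vs ++ [s]) (fun v => v) with
    | none => rw [PySem.List.max?_eq_none_iff] at hmx; simp at hmx
    | some m => exact ⟨m, rfl⟩
  have hmem := PySem.List.max?_mem hm
  have hmax := PySem.List.max?_isMax hm s (by simp)
  have hsm : s ≤ m := hmax
  rw [hm]
  rcases List.mem_append.mp hmem with h1 | h1
  · exact absurd (h m h1) (by omega)
  · simp at h1; rw [h1]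

-- B's loop is the identity once the dict already contains every in-range position.
lemma bLoop_const (max_pos : Int) (ps : List (Int × Int)) (first : PySem.Dict Int Int)
    (h : ∀ x : Int, 0 < x → x ≤ max_pos → first.contains x = true) :
    bLoop max_pos ps first = first := by
  induction ps with
  | nil => rfl
  | cons p rest ih =>
    unfold bLoop
    rw [List.foldl_cons]
    have hc : ¬ (0 < p.2 ∧ p.2 ≤ max_pos ∧ first.contains p.2 = false) := by
      rintro ⟨h1, h2, h3⟩; rw [h p.2 h1 h2] at h3; cases h3
    rw [if_neg hc]; exact ih

-- With max_pos ≤ 0 every leaf is skipped and A returns -1.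
lemma go_neg (max_pos : Int) (hmp : max_pos ≤ 0) :
    ∀ (rest : List (Int × Int)) (steps : PySem.Dict Int Bool),
    fnGo max_pos rest steps = -1 := by
  intro rest
  induction rest with
  | nil => intro steps; rfl
  | cons p rest ih =>
    intro steps
    obtain ⟨sec, leaf⟩ := p
    unfold fnGo
    rw [if_pos (by right; omega)]
    exact ih steps

-- Main invariant lemma: A's scan with the recorded set equals the finish of the
-- first-occurrence dict, for any common suffix of the enumeration.
lemma go_eq (max_pos : Int) (hmp : 0 < max_pos) :
    ∀ (rest : List (Int × Int)) (steps : PySem.Dict Int Bool) (first : PySem.Dict Int Int),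
    steps.keys = first.keys →
    first.keys.Nodup →
    (∀ k ∈ first.keys, 0 < k ∧ k ≤ max_pos) →
    (first.size : Int) < max_pos →
    first.values.Pairwise (· < ·) →
    (∀ v ∈ first.values, 0 ≤ v) →
    (∀ v ∈ first.values, ∀ p ∈ rest, v < p.1) →
    (∀ p ∈ rest, 0 ≤ p.1) →
    rest.Pairwise (fun p q => p.1 < q.1) →
    fnGo max_pos rest steps = bFin max_pos (bLoop max_pos rest first) := by
  intro rest
  induction rest with
  | nil =>
    intro steps first hkeys hnd hrange hsize hvp hvnn hsep hrnn hinc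
    show (-1 : Int) = bFin max_pos first
    unfold bFin
    rw [if_neg (by rintro ⟨_, h2⟩; omega)]
  | cons p rest ih =>
    intro steps first hkeys hnd hrange hsize hvp hvnn hsep hrnn hinc
    obtain ⟨sec, leaf⟩ := p
    have hconeq : steps.contains leaf = first.contains leaf := by
      rw [PySem.Dict.contains_eq_decide_mem_keys, PySem.Dict.contains_eq_decide_mem_keys, hkeys]
    unfold fnGo bLoop
    rw [List.foldl_cons]
    by_cases hskip : steps.contains leaf = true ∨ leaf > max_pos ∨ leaf ≤ 0
    · rw [if_pos hskip]
      have hc : ¬ (0 < (sec, leaf).2 ∧ (sec, leaf).2 ≤ max_pos ∧ first.contains (sec, leaf).2 = false) := by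
        rintro ⟨h1, h2, h3⟩
        rcases hskip with h | h | h
        · rw [hconeq, h3] at h; cases h
        · exact absurd h2 (by omega)
        · exact absurd h1 (by omega)
      rw [if_neg hc]
      exact ih steps first hkeys hnd hrange hsize hvp hvnn
        (fun v hv p hp => hsep v hv p (List.mem_cons_of_mem _ hp))
        (fun p hp => hrnn p (List.mem_cons_of_mem _ hp)) hinc.of_cons
    · push Not at hskip
      obtain ⟨hnc, hle, hpos⟩ := hskip
      have hnc : steps.contains leaf = false := by
        cases h : steps.contains leaf
        · rfl
        · exact absurd h hnc
      have hfc : first.contains leaf = false := by rw [← hconeq]; exact hnc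
      have hc : 0 < (sec, leaf).2 ∧ (sec, leaf).2 ≤ max_pos ∧ first.contains (sec, leaf).2 = false := by
        exact ⟨by omega, hle, hfc⟩
      rw [if_neg (show ¬ (steps.contains leaf = true ∨ leaf > max_pos ∨ leaf ≤ 0) by
        rw [hnc]; simp; omega), if_pos hc]
      -- facts about the two fresh inserts
      have hitemsS := PySem.Dict.items_insert_of_not_contains steps (true) hnc
      have hitemsF := PySem.Dict.items_insert_of_not_contains first (sec) hfc
      have hkeysS : (steps.insert leaf true).keys = steps.keys ++ [leaf] := by
        simp [PySem.Dict.keys, hitemsS]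
      have hkeysF : (first.insert leaf sec).keys = first.keys ++ [leaf] := by
        simp [PySem.Dict.keys, hitemsF]
      have hvalsF : (first.insert leaf sec).values = first.values ++ [sec] := by
        simp [PySem.Dict.values, hitemsF]
      have hkeys' : (steps.insert leaf true).keys = (first.insert leaf sec).keys := by
        rw [hkeysS, hkeysF, hkeys]
      have hnd' : (first.insert leaf sec).keys.Nodup := PySem.Dict.nodup_keys_insert _ _ _ hnd
      have hrange' : ∀ k ∈ (first.insert leaf sec).keys, 0 < k ∧ k ≤ max_pos := by
        intro k hk; rw [hkeysF] at hk
        rcases List.mem_append.mp hk with h | h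
        · exact hrange k h
        · simp at h; subst h; exact ⟨by omega, hle⟩
      have hsecnn : (0:Int) ≤ sec := hrnn (sec, leaf) List.mem_cons_self
      have hvlt : ∀ v ∈ first.values, v < sec := fun v hv => hsep v hv (sec, leaf) List.mem_cons_self
      have hvp' : ((first.insert leaf sec).values).Pairwise (· < ·) := by
        rw [hvalsF]
        exact List.pairwise_append.mpr ⟨hvp, List.pairwise_singleton _ _,
          fun v hv s' hs' => by simp at hs'; subst hs'; exact hvlt v hv⟩
      have hvnn' : ∀ v ∈ (first.insert leaf sec).values, 0 ≤ v := by
        intro v hv; rw [hvalsF] at hv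
        rcases List.mem_append.mp hv with h | h
        · exact hvnn v h
        · simp at h; omega
      have hsep' : ∀ v ∈ (first.insert leaf sec).values, ∀ p ∈ rest, v < p.1 := by
        intro v hv p hp; rw [hvalsF] at hv
        rcases List.mem_append.mp hv with h | h
        · exact hsep v h p (List.mem_cons_of_mem _ hp)
        · simp at h; subst h
          exact (List.pairwise_cons.mp hinc).1 p hp
      have hsizeS : (steps.insert leaf true).size = steps.size + 1 := by
        simp [PySem.Dict.size, hitemsS]
      have hsizeF : (first.insert leaf sec).size = first.size + 1 := by
        simp [PySem.Dict.size, hitemsF]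
      have hsizeEq : (steps.insert leaf true).size = (first.insert leaf sec).size := by
        have h1 : (steps.insert leaf true).size = (steps.insert leaf true).keys.length := by
          simp [PySem.Dict.size, PySem.Dict.keys]
        have h2 : (first.insert leaf sec).size = (first.insert leaf sec).keys.length := by
          simp [PySem.Dict.size, PySem.Dict.keys]
        rw [h1, h2, hkeys']
      by_cases hfull : ((first.insert leaf sec).size : Int) = max_pos
      · -- A returns sec; the loop adds nothing more and max of values is sec
        have hvlen : ((first.insert leaf sec).values.length : Int) = max_pos := by
          have : (first.insert leaf sec).values.length = (first.insert leaf sec).size := by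
            simp [PySem.Dict.size, PySem.Dict.values]
          rw [this]; exact hfull
        have hvle : ∀ v ∈ (first.insert leaf sec).values, v ≤ sec := by
          intro v hv; rw [hvalsF] at hv
          rcases List.mem_append.mp hv with h | h
          · exact le_of_lt (hvlt v h)
          · simp at h; omega
        have hlb := len_le_of_sorted_bounded _ sec hsecnn hvp' hvnn' hvle
        rw [hvlen] at hlb
        rw [if_neg (by omega), if_pos (by rw [hsizeEq]; exact hfull)]
        -- the dict side
        have hklen : (((first.insert leaf sec).keys.length : Nat) : Int) = max_pos := by
          have : (first.insert leaf sec).keys.length = (first.insert leaf sec).size := by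
            simp [PySem.Dict.size, PySem.Dict.keys]
          rw [this]; exact hfull
        have hall : ∀ x : Int, 0 < x → x ≤ max_pos → (first.insert leaf sec).contains x = true := by
          intro x hx0 hxm
          rw [PySem.Dict.contains_eq_decide_mem_keys]
          exact decide_eq_true (mem_of_full _ max_pos hnd' hrange' hklen x hx0 hxm)
        rw [show List.foldl (fun d p => if 0 < p.2 ∧ p.2 ≤ max_pos ∧ d.contains p.2 = false then d.insert p.2 p.1 else d) (first.insert (sec, leaf).2 (sec, leaf).1) rest = bLoop max_pos rest (first.insert leaf sec) from rfl, bLoop_const _ _ _ hall]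
        unfold bFin
        rw [if_pos ⟨hmp, hfull⟩, hvalsF, max?_append_last _ _ hvlt]
      · -- both sides just continue with the extended dicts
        have hsize' : ((first.insert leaf sec).size : Int) < max_pos := by
          have hk1 : first.keys.length = first.size := by simp [PySem.Dict.size, PySem.Dict.keys]
          rw [hsizeF]; push_cast; rw [hsizeF] at hfull; push_cast at hfull; omega
        have hrec := ih (steps.insert leaf true) (first.insert leaf sec)
          hkeys' hnd' hrange' hsize' hvp' hvnn' hsep'
          (fun p hp => hrnn p (List.mem_cons_of_mem _ hp)) hinc.of_cons
        by_cases h1 : sec < max_pos - 1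
        · rw [if_pos h1]; exact hrec
        · rw [if_neg h1, if_neg (show ¬ ((steps.insert leaf true).size : Int) = max_pos by
            rw [hsizeEq]; exact hfull)]
          exact hrec

-- ===== bridge: the first-occurrence dict vs B's per-position index loop =====

lemma bLoop_get? (m : Int) (ps : List (Int × Int)) (d : PySem.Dict Int Int) (k : Int) :
    (bLoop m ps d).get? k =
      if 0 < k ∧ k ≤ m ∧ d.contains k = false
      then (ps.find? (fun p => p.2 == k)).map Prod.fst
      else d.get? k := by
  induction ps generalizing d with
  | nil =>
    show d.get? k = _
    split_ifs with h
    · have hc : d.contains k = false := h.2.2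
      rw [PySem.Dict.contains_eq_isSome_get?] at hc
      simp [Option.isSome_eq_false_iff, Option.isNone_iff_eq_none] at hc
      simp [hc]
    · rfl
  | cons p ps ih =>
    rw [show bLoop m (p :: ps) d
        = bLoop m ps (if 0 < p.2 ∧ p.2 ≤ m ∧ d.contains p.2 = false then d.insert p.2 p.1 else d)
        from rfl]
    by_cases hcond : 0 < p.2 ∧ p.2 ≤ m ∧ d.contains p.2 = false
    · rw [if_pos hcond, ih]
      by_cases hk : p.2 = k
      · subst hk
        rw [if_neg (by simp [PySem.Dict.contains_insert_self]),
            if_pos ⟨hcond.1, hcond.2.1, hcond.2.2⟩,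
            List.find?_cons_of_pos (by simp)]
        simp [PySem.Dict.get?_insert_self]
      · have hne : k ≠ p.2 := fun h => hk h.symm
        have hc' : (d.insert p.2 p.1).contains k = d.contains k := by
          rw [PySem.Dict.contains_insert]
          simp [beq_eq_false_iff_ne.mpr hne]
        have hg' : (d.insert p.2 p.1).get? k = d.get? k :=
          PySem.Dict.get?_insert_of_ne _ _ hne
        rw [hc', hg', List.find?_cons_of_neg (by simp [hk])]
    · rw [if_neg hcond, ih]
      by_cases hcd : 0 < k ∧ k ≤ m ∧ d.contains k = false
      · rw [if_pos hcd, if_pos hcd]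
        have hne : (p.2 == k) = false := by
          apply beq_eq_false_iff_ne.mpr
          intro h
          exact hcond (h ▸ ⟨hcd.1, hcd.2.1, hcd.2.2⟩)
        rw [List.find?_cons_of_neg (by simp [beq_eq_false_iff_ne] at hne ⊢; exact hne)]
      · rw [if_neg hcd, if_neg hcd]

lemma find?_enumerate_eq (xs : List Int) (k : Int) :
    ∀ s : Int, ((PySem.List.enumerate xs s).find? (fun p => p.2 == k)).map Prod.fst
      = (PySem.List.index? xs k).map (fun i => s + (i : Int)) := by
  induction xs with
  | nil => intro s; simp [PySem.List.enumerate_nil]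
  | cons x xs ih =>
    intro s
    rw [PySem.List.enumerate_cons]
    by_cases hx : x = k
    · subst hx
      rw [List.find?_cons_of_pos (by simp), PySem.List.index?_cons_self]
      simp
    · rw [List.find?_cons_of_neg (by simp [hx]), ih (s + 1),
          PySem.List.index?_cons_of_ne _ hx]
      cases hi : PySem.List.index? xs k
      · simp
      · simp
        ring

lemma nodup_keys_bLoop (m : Int) (ps : List (Int × Int)) :
    ∀ d : PySem.Dict Int Int, d.keys.Nodup → (bLoop m ps d).keys.Nodup := by
  induction ps with
  | nil => intro d h; exact h
  | cons p ps ih =>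
    intro d h
    rw [show bLoop m (p :: ps) d
        = bLoop m ps (if 0 < p.2 ∧ p.2 ≤ m ∧ d.contains p.2 = false then d.insert p.2 p.1 else d)
        from rfl]
    apply ih
    split_ifs with hc
    · exact PySem.Dict.nodup_keys_insert _ _ _ h
    · exact h

lemma gIdx_nonneg (leaves : List Int) (q : Int) : 0 ≤ gIdx leaves q := by
  cases hi : PySem.List.index? leaves q
  · simp [gIdx]
  · simp [gIdx]

lemma bGo_props (max_pos : Int) (leaves : List Int) :
    ∀ (n : Nat) (p ans : Int), (max_pos + 1 - p).toNat = n →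
    (∀ q, p ≤ q → q ≤ max_pos → q ∈ leaves) →
    ans ≤ bGo max_pos leaves p ans ∧
    (∀ q, p ≤ q → q ≤ max_pos → gIdx leaves q ≤ bGo max_pos leaves p ans) ∧
    (bGo max_pos leaves p ans = ans ∨
      ∃ q, p ≤ q ∧ q ≤ max_pos ∧ bGo max_pos leaves p ans = gIdx leaves q) := by
  intro n
  induction n using Nat.strong_induction_on with
  | _ n ihn =>
    intro p ans hn hcov
    by_cases hp : p ≤ max_pos
    · have hmem : p ∈ leaves := hcov p le_rfl hp
      obtain ⟨idx, hidx⟩ : ∃ idx, PySem.List.index? leaves p = some idx := by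
        cases h : PySem.List.index? leaves p with
        | none =>
          rw [PySem.List.index?_eq_none_iff] at h
          exact absurd hmem h
        | some i => exact ⟨i, rfl⟩
      have hstep : bGo max_pos leaves p ans = bGo max_pos leaves (p + 1) (max ans (idx : Int)) := by
        rw [bGo, dif_pos hp, hidx]
      obtain ⟨ha, hb, hc⟩ := ihn (max_pos + 1 - (p + 1)).toNat (by omega) (p + 1)
        (max ans (idx : Int)) rfl (fun q hq1 hq2 => hcov q (by omega) hq2)
      rw [hstep]
      refine ⟨le_trans (le_max_left _ _) ha, ?_, ?_⟩
      · intro q hq1 hq2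
        rcases eq_or_lt_of_le hq1 with heq | h
        · rw [← heq]
          have hg : gIdx leaves p = (idx : Int) := by
            simp only [gIdx, hidx, Option.getD_some]
          rw [hg]
          exact le_trans (le_max_right _ _) ha
        · exact hb q (by omega) hq2
      · rcases hc with hc | ⟨q, hq1, hq2, hq3⟩
        · rcases max_cases ans (idx : Int) with ⟨hm, _⟩ | ⟨hm, _⟩
          · left; rw [hc, hm]
          · right
            exact ⟨p, le_rfl, hp, by
              rw [hc, hm]; simp only [gIdx, hidx, Option.getD_some]⟩
        · right; exact ⟨q, by omega, hq2, hq3⟩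
    · have hstep : bGo max_pos leaves p ans = ans := by rw [bGo, dif_neg hp]
      rw [hstep]
      exact ⟨le_rfl, fun q hq1 hq2 => absurd (le_trans hq1 hq2) hp, Or.inl rfl⟩

lemma bGo_none (max_pos : Int) (leaves : List Int) :
    ∀ (n : Nat) (p ans : Int), (max_pos + 1 - p).toNat = n →
    (∃ q, p ≤ q ∧ q ≤ max_pos ∧ PySem.List.index? leaves q = none) →
    bGo max_pos leaves p ans = -1 := by
  intro n
  induction n using Nat.strong_induction_on with
  | _ n ihn =>
    intro p ans hn hex
    obtain ⟨q, hq1, hq2, hq3⟩ := hex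
    have hp : p ≤ max_pos := le_trans hq1 hq2
    rw [bGo, dif_pos hp]
    cases h : PySem.List.index? leaves p with
    | none => rfl
    | some idx =>
      have hqp : p ≠ q := by intro e; rw [e, hq3] at h; cases h
      exact ihn (max_pos + 1 - (p + 1)).toNat (by omega) (p + 1) _ rfl
        ⟨q, by omega, hq2, hq3⟩

lemma bridge (max_pos : Int) (leaves : List Int) (hmp : 0 < max_pos) :
    bFin max_pos (bLoop max_pos (PySem.List.enumerate leaves) PySem.Dict.empty)
      = fn_alt max_pos leaves := by
  set D := bLoop max_pos (PySem.List.enumerate leaves) PySem.Dict.empty with hD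
  have hget : ∀ k, D.get? k = if 0 < k ∧ k ≤ max_pos
      then (PySem.List.index? leaves k).map (fun i => (0 : Int) + (i : Int)) else none := by
    intro k
    rw [hD, bLoop_get?]
    rw [find?_enumerate_eq leaves k 0]
    split_ifs with h1 h2 h2
    · rfl
    · exact absurd ⟨h1.1, h1.2.1⟩ h2
    · exact absurd ⟨h2.1, h2.2, by simp [PySem.Dict.contains_empty]⟩ h1
    · simp [PySem.Dict.get?_empty]
  have hnd : D.keys.Nodup := nodup_keys_bLoop _ _ _ (by simp [PySem.Dict.keys, PySem.Dict.empty])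
  have hsz : D.size = D.keys.length := by simp [PySem.Dict.size, PySem.Dict.keys]
  have hmemk : ∀ k, k ∈ D.keys ↔ (0 < k ∧ k ≤ max_pos ∧ k ∈ leaves) := by
    intro k
    rw [← PySem.Dict.contains_iff_mem_keys, PySem.Dict.contains_eq_isSome_get?, hget]
    split_ifs with h
    · cases hi : PySem.List.index? leaves k with
      | none =>
        have hni : k ∉ leaves := by rw [← PySem.List.index?_eq_none_iff]; exact hi
        simp [hni]
      | some i =>
        have hmem : k ∈ leaves := by
          rw [← PySem.List.index?_isSome_iff, hi]; rfl
        simp [h.1, h.2, hmem]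
    · simp
      intro h1 h2
      exact absurd ⟨h1, h2⟩ h
  have hrange : ∀ k ∈ D.keys, 0 < k ∧ k ≤ max_pos :=
    fun k hk => ⟨((hmemk k).mp hk).1, ((hmemk k).mp hk).2.1⟩
  by_cases hfull : (D.size : Int) = max_pos
  · have hklen : (D.keys.length : Int) = max_pos := by rw [← hsz]; exact hfull
    have hcov : ∀ q, 0 < q → q ≤ max_pos → q ∈ leaves := by
      intro q h1 h2
      exact ((hmemk q).mp (mem_of_full D.keys max_pos hnd hrange hklen q h1 h2)).2.2
    have hvals : D.values = D.keys.map (fun k => gIdx leaves k) := by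
      rw [PySem.Dict.values_eq_map_keys D hnd 0]
      apply List.map_congr_left
      intro k hk
      have h3 := (hmemk k).mp hk
      obtain ⟨idx, hidx⟩ : ∃ i, PySem.List.index? leaves k = some i := by
        cases hi : PySem.List.index? leaves k with
        | none => rw [PySem.List.index?_eq_none_iff] at hi; exact absurd h3.2.2 hi
        | some i => exact ⟨i, rfl⟩
      rw [PySem.Dict.getD_eq_get?_getD, hget, if_pos ⟨h3.1, h3.2.1⟩, hidx]
      unfold gIdx
      rw [hidx]
      simp
    unfold bFin
    rw [if_pos ⟨hmp, hfull⟩]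
    have hvlen : D.values.length = D.size := by simp [PySem.Dict.size, PySem.Dict.values]
    obtain ⟨v, hv⟩ : ∃ v, PySem.List.max? D.values (fun x => x) = some v := by
      cases h : PySem.List.max? D.values (fun x => x) with
      | none =>
        rw [PySem.List.max?_eq_none_iff] at h
        rw [h] at hvlen
        simp at hvlen
        omega
      | some v => exact ⟨v, rfl⟩
    rw [hv]
    unfold fn_alt
    show v = bGo max_pos leaves 1 (-1)
    obtain ⟨ha, hb, hc⟩ := bGo_props max_pos leaves (max_pos + 1 - 1).toNat 1 (-1) rfl
      (fun q h1 h2 => hcov q (by omega) h2)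
    set r := bGo max_pos leaves 1 (-1) with hr
    have hr0 : 0 ≤ r := by
      have h1m : gIdx leaves 1 ≤ r := hb 1 le_rfl (by omega)
      have h2m := gIdx_nonneg leaves 1
      omega
    obtain ⟨q, hq1, hq2, hq3⟩ : ∃ q, 1 ≤ q ∧ q ≤ max_pos ∧ r = gIdx leaves q := by
      rcases hc with h | h
      · omega
      · exact h
    have hrv : r ∈ D.values := by
      rw [hvals]
      exact List.mem_map.mpr ⟨q, (hmemk q).mpr ⟨by omega, hq2, hcov q (by omega) hq2⟩, hq3.symm⟩
    have h1 : r ≤ v := PySem.List.max?_isMax hv r hrv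
    have h2 : v ≤ r := by
      have hvmem := PySem.List.max?_mem hv
      rw [hvals] at hvmem
      obtain ⟨k, hk, hkv⟩ := List.mem_map.mp hvmem
      have h3 := (hmemk k).mp hk
      rw [← hkv]
      exact hb k (by omega) h3.2.1
    omega
  · unfold bFin
    rw [if_neg (by rintro ⟨_, h⟩; exact hfull h)]
    obtain ⟨q, hq1, hq2, hqk⟩ : ∃ q, 1 ≤ q ∧ q ≤ max_pos ∧ q ∉ D.keys := by
      by_contra hno
      push Not at hno
      have hsub : Finset.Icc (1:Int) max_pos ⊆ D.keys.toFinset := by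
        intro x hx
        rw [List.mem_toFinset]
        rcases Finset.mem_Icc.mp hx with ⟨hx1, hx2⟩
        exact hno x hx1 hx2
      have hcard := Finset.card_le_card hsub
      rw [List.toFinset_card_of_nodup hnd, Int.card_Icc] at hcard
      have hle : (D.keys.length : Int) ≤ max_pos := len_le_of_range D.keys max_pos (by omega) hnd hrange
      exact hfull (by rw [hsz]; omega)
    have hnone : PySem.List.index? leaves q = none := by
      rw [PySem.List.index?_eq_none_iff]
      intro hmem
      exact hqk ((hmemk q).mpr ⟨by omega, hq2, hmem⟩)
    unfold fn_alt
    rw [bGo_none max_pos leaves (max_pos + 1 - 1).toNat 1 (-1) rfl ⟨q, hq1, hq2, hnone⟩]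

-- ===== VERDICT (by name: the statement is the Claim_ definition above) =====
theorem fn_spec : Claim_equal_fn := by
  intro max_pos leaves _
  show fn max_pos leaves = fn_alt max_pos leaves
  by_cases hmp : 0 < max_pos
  · rw [← bridge max_pos leaves hmp]
    unfold fn
    apply go_eq max_pos hmp
    · simp [PySem.Dict.keys, PySem.Dict.empty]
    · simp [PySem.Dict.keys, PySem.Dict.empty]
    · simp [PySem.Dict.keys, PySem.Dict.empty]
    · simp [PySem.Dict.size, PySem.Dict.empty]; omega
    · simp [PySem.Dict.values, PySem.Dict.empty]
    · simp [PySem.Dict.values, PySem.Dict.empty]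
    · simp [PySem.Dict.values, PySem.Dict.empty]
    · intro p hp
      rw [PySem.List.mem_enumerate_iff] at hp
      obtain ⟨k, hk, rfl⟩ := hp
      simp
    · exact PySem.List.pairwise_lt_enumerate _ _
  · unfold fn
    rw [go_neg max_pos (by omega)]
    unfold fn_alt
    rw [bGo]
    rw [dif_neg (show ¬ (1:Int) ≤ max_pos by omega)]
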